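-- pv_equiv track=rewrite | github.com/RedBearAK/Excel-Recipe-Processor | excel_recipe_processor/readers/openpyxl_excel_reader.py | _detect_header_issues
-- ===== SOURCE A (Python) =====
-- from typing import List, Optional
--
-- def _detect_header_issues(headers: List[str]) -> List[str]:
--     """
--     Detect potential issues with headers.
--
--     Args:
--         headers: List of header strings
--
--     Returns:
--         List of issue descriptions
--     """
--     issues = []
--
--     # Check for trailing empty headers
--     trailing_empty = 0
--     for header in reversed(headers):
--         if not header.strip():
--             trailing_empty += 1
--         else:
--             break
--
--     if trailing_empty > 0:
--         issues.append(f"{trailing_empty} trailing empty columns")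
--
--     # Check for duplicate headers
--     non_empty_headers = [h for h in headers if h.strip()]
--     if len(non_empty_headers) != len(set(non_empty_headers)):
--         issues.append("duplicate header names detected")
--
--     # Check for headers that look like dates
--     date_like_headers = [h for h in headers if '/' in h and any(c.isdigit() for c in h)]
--     if date_like_headers:
--         issues.append(f"{len(date_like_headers)} headers look like dates")
--
--     return issues
-- ===== SOURCE B (Python) =====
-- from typing import List
--
-- def _detect_header_issues(headers: List[str]) -> List[str]:
--     """Single forward pass: track last non-empty index, a seen-set duplicate
--     flag and a date-like count, then build the messages once at the end."""
--     last_nonempty = -1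
--     seen = set()
--     duplicate = False
--     date_count = 0
--     for i, h in enumerate(headers):
--         if h.strip():
--             last_nonempty = i
--             if h in seen:
--                 duplicate = True
--             else:
--                 seen.add(h)
--         if '/' in h and any(c.isdigit() for c in h):
--             date_count += 1
--     issues = []
--     trailing = len(headers) - last_nonempty - 1
--     if trailing > 0:
--         issues.append(f"{trailing} trailing empty columns")
--     if duplicate:
--         issues.append("duplicate header names detected")
--     if date_count > 0:
--         issues.append(f"{date_count} headers look like dates")
--     return issues
-- ===== Notes on version B (the rewrite author's own statement) =====
-- stated objective: alternative
-- what changed: Replaces A's reversed scan-with-break plus two separate list comprehensions by one forward pass that tracks the last non-empty index (trailing count becomes index arithmetic), a seen-set duplicate flag, and a running date-like count.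
import Mathlib
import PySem

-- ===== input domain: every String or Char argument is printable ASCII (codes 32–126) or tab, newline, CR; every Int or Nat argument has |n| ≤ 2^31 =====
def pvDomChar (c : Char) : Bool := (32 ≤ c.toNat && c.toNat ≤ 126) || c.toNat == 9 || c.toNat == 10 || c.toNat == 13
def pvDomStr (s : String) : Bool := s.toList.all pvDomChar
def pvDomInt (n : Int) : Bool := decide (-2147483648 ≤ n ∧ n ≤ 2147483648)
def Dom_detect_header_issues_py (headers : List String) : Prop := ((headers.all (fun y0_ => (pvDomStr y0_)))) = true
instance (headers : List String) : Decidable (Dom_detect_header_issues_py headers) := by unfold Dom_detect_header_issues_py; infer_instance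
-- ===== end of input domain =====

-- B replaces A's reversed scan-with-break and two list comprehensions by one forward
-- pass tracking last-nonempty index, a seen-set duplicate flag and a date count (alternative decomposition, same cost).


-- truthiness of header.strip()
def pvStripTruthy (h : String) : Bool := decide (PySem.Str.strip h ≠ "")
-- '/' in h and any(c.isdigit() for c in h)
def pvDateLike (h : String) : Bool := PySem.Str.isIn "/" h && h.toList.any PySem.Chars.isdigit

-- ===== PORT A =====
-- the 'for header in reversed(headers): … else: break' loop
def pvTrailLoop : List String → Nat
  | [] => 0
  | h :: t => if pvStripTruthy h then 0 else pvTrailLoop t + 1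

def detect_header_issues_py (headers : List String) : List String :=
  let issues : List String := []
  let trailing_empty : Nat := pvTrailLoop headers.reverse
  let issues := if trailing_empty > 0 then
      issues ++ [PySem.Int.toStr (trailing_empty : Int) ++ " trailing empty columns"] else issues
  let non_empty_headers := headers.filter pvStripTruthy
  let issues := if non_empty_headers.length ≠ (PySem.Set.ofList non_empty_headers).length then
      issues ++ ["duplicate header names detected"] else issues
  let date_like_headers := headers.filter pvDateLike
  let issues := if date_like_headers.length > 0 then
      issues ++ [PySem.Int.toStr (date_like_headers.length : Int) ++ " headers look like dates"] else issues
  issues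

-- ===== PORT B =====
structure PvScanState where
  lastNonempty : Int
  seen : PySem.Set String
  dup : Bool
  dateCount : Nat
deriving Repr, DecidableEq

def pvStep (st : PvScanState) (ih : Int × String) : PvScanState :=
  let st :=
    if pvStripTruthy ih.2 then
      { st with lastNonempty := ih.1,
                dup := if PySem.Set.contains st.seen ih.2 then true else st.dup,
                seen := if PySem.Set.contains st.seen ih.2 then st.seen else PySem.Set.add st.seen ih.2 }
    else st
  if pvDateLike ih.2 then { st with dateCount := st.dateCount + 1 } else st

def detect_header_issues_py_alt (headers : List String) : List String :=
  let st := (PySem.List.enumerate headers 0).foldl pvStep ⟨-1, PySem.Set.empty, false, 0⟩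
  let trailing : Int := (headers.length : Int) - st.lastNonempty - 1
  let issues : List String := []
  let issues := if trailing > 0 then
      issues ++ [PySem.Int.toStr trailing ++ " trailing empty columns"] else issues
  let issues := if st.dup then issues ++ ["duplicate header names detected"] else issues
  if st.dateCount > 0 then
      issues ++ [PySem.Int.toStr (st.dateCount : Int) ++ " headers look like dates"] else issues

-- ===== PRECONDITION & SPEC =====
def Spec_detect_header_issues_py (headers : List String) (out : List String) : Prop := out = detect_header_issues_py_alt headers
instance (headers : List String) (out : List String) : Decidable (Spec_detect_header_issues_py headers out) := by unfold Spec_detect_header_issues_py; infer_instance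

-- ===== CLAIM (what is proved, stated in full; the proofs are below) =====
def Claim_equal_detect_header_issues_py : Prop := ∀ (headers : List String), Dom_detect_header_issues_py headers → Spec_detect_header_issues_py headers (detect_header_issues_py headers)

-- ===== LEMMAS AND PROOFS =====

-- set(xs) has as many elements as xs exactly when xs has no duplicates
lemma pv_ofList_length_eq_iff (l : List String) :
    (PySem.Set.ofList l).length = l.length ↔ l.Nodup := by
  induction l using List.reverseRecOn with
  | nil => simp [PySem.Set.ofList]
  | append_singleton xs x ih =>
    rw [PySem.Set.ofList_append_singleton, PySem.Set.add_eq_ite]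
    have hle := PySem.Set.length_ofList_le (xs := xs)
    have hNodApp : (xs ++ [x]).Nodup ↔ xs.Nodup ∧ x ∉ xs := by
      simp only [List.nodup_append, List.nodup_singleton, true_and, and_congr_right_iff]
      intro _
      constructor
      · intro h hx
        exact h x hx x (List.mem_singleton_self x) rfl
      · intro h a ha b hb
        rw [List.mem_singleton] at hb
        subst hb
        exact fun he => h (he ▸ ha)
    by_cases hx' : x ∈ xs
    · have hx : x ∈ PySem.Set.ofList xs := (PySem.Set.mem_ofList _ _).2 hx'
      rw [if_pos hx]
      simp only [List.length_append, List.length_cons, List.length_nil, hNodApp]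
      constructor
      · intro h; omega
      · intro h; exact absurd hx' h.2
    · have hx : x ∉ PySem.Set.ofList xs := fun h => hx' ((PySem.Set.mem_ofList _ _).1 h)
      rw [if_neg hx]
      simp only [List.length_append, List.length_cons, List.length_nil, hNodApp]
      constructor
      · intro h; exact ⟨ih.1 (by omega), hx'⟩
      · intro h; have := ih.2 h.1; omega

-- invariant of B's single forward pass, by induction from the right
lemma pv_scan_spec (headers : List String) :
    ((PySem.List.enumerate headers 0).foldl pvStep ⟨-1, PySem.Set.empty, false, 0⟩).lastNonempty
        = (headers.length : Int) - (pvTrailLoop headers.reverse : Int) - 1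
    ∧ ((PySem.List.enumerate headers 0).foldl pvStep ⟨-1, PySem.Set.empty, false, 0⟩).seen
        = PySem.Set.ofList (headers.filter pvStripTruthy)
    ∧ ((PySem.List.enumerate headers 0).foldl pvStep ⟨-1, PySem.Set.empty, false, 0⟩).dup
        = decide (¬ (headers.filter pvStripTruthy).Nodup)
    ∧ ((PySem.List.enumerate headers 0).foldl pvStep ⟨-1, PySem.Set.empty, false, 0⟩).dateCount
        = (headers.filter pvDateLike).length := by
  induction headers using List.reverseRecOn with
  | nil => simp [PySem.List.enumerate, pvTrailLoop, PySem.Set.ofList]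
  | append_singleton xs x ih =>
    obtain ⟨ih1, ih2, ih3, ih4⟩ := ih
    rw [PySem.List.enumerate_append]
    simp only [PySem.List.enumerate_cons, PySem.List.enumerate_nil, List.foldl_append,
      List.foldl_cons, List.foldl_nil]
    set F := List.filter pvStripTruthy xs with hF
    set st := (PySem.List.enumerate xs 0).foldl pvStep ⟨-1, PySem.Set.empty, false, 0⟩ with hst
    have hNodApp : (F ++ [x]).Nodup ↔ F.Nodup ∧ x ∉ F := by
      simp only [List.nodup_append, List.nodup_singleton, true_and, and_congr_right_iff]
      intro _
      constructor
      · intro h hx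
        exact h x hx x (List.mem_singleton_self x) rfl
      · intro h a ha b hb
        rw [List.mem_singleton] at hb
        subst hb
        exact fun he => h (he ▸ ha)
    by_cases hP : pvStripTruthy x
    · have hfilter : List.filter pvStripTruthy (xs ++ [x]) = F ++ [x] := by
        simp [List.filter_append, hP, ← hF]
      have htrail : pvTrailLoop (x :: xs.reverse) = 0 := by
        simp [pvTrailLoop, hP]
      by_cases hxF : x ∈ F
      · have hcont : PySem.Set.contains st.seen x = true := by
          rw [ih2]; exact (PySem.Set.contains_iff _ _).2 ((PySem.Set.mem_ofList _ _).2 hxF)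
        have hseen : PySem.Set.ofList (F ++ [x]) = PySem.Set.ofList F := by
          rw [PySem.Set.ofList_append_singleton]
          exact PySem.Set.add_of_mem ((PySem.Set.mem_ofList _ _).2 hxF)
        unfold pvStep
        by_cases hD : pvDateLike x <;>
          refine ⟨?_, ?_, ?_, ?_⟩ <;>
            simp [hP, hD, hcont, hfilter, htrail, hseen, ih2, ih3, ih4, hNodApp, hxF]
      · have hcont : PySem.Set.contains st.seen x = false := by
          rw [ih2]
          by_contra hc
          exact hxF ((PySem.Set.mem_ofList _ _).1
            ((PySem.Set.contains_iff _ _).1 (by revert hc; cases PySem.Set.contains (PySem.Set.ofList F) x <;> simp)))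
        have hseen : PySem.Set.ofList (F ++ [x]) = PySem.Set.add (PySem.Set.ofList F) x :=
          PySem.Set.ofList_append_singleton _ _
        unfold pvStep
        by_cases hD : pvDateLike x <;>
          refine ⟨?_, ?_, ?_, ?_⟩ <;>
            simp [hP, hD, hcont, hfilter, htrail, hseen, ih2, ih3, ih4, hNodApp, hxF]
    · have hfilter : List.filter pvStripTruthy (xs ++ [x]) = F := by
        simp [List.filter_append, hP, ← hF]
      have htrail : pvTrailLoop (x :: xs.reverse) = pvTrailLoop xs.reverse + 1 := by
        simp [pvTrailLoop, hP]
      unfold pvStep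
      by_cases hD : pvDateLike x <;>
        refine ⟨?_, ?_, ?_, ?_⟩ <;>
          simp [hP, hD, hfilter, htrail, ih1, ih2, ih3, ih4]

-- ===== VERDICT (by name: the statement is the Claim_ definition above) =====
theorem detect_header_issues_py_spec : Claim_equal_detect_header_issues_py := by
  intro headers _
  unfold Spec_detect_header_issues_py detect_header_issues_py detect_header_issues_py_alt
  obtain ⟨h1, h2, h3, h4⟩ := pv_scan_spec headers
  have hdup : ((headers.filter pvStripTruthy).length ≠ (PySem.Set.ofList (headers.filter pvStripTruthy)).length)
      ↔ ¬ (headers.filter pvStripTruthy).Nodup := by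
    rw [← pv_ofList_length_eq_iff]; tauto
  simp only [h1, h3, h4]
  have htr : (headers.length : Int) - ((headers.length : Int) - (pvTrailLoop headers.reverse : Int) - 1) - 1
      = (pvTrailLoop headers.reverse : Int) := by ring
  rw [htr]
  simp only [hdup, decide_eq_true_eq, gt_iff_lt, Int.natCast_pos]
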